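-- pv_equiv track=rewrite | github.com/WhyPilotXia/nonebot_plugin_mail | mail_v4.py | get_key_by_qq
-- ===== SOURCE A (Python) =====
-- qq_map = {
--     "31e70d82-c716-8032-9ccb-c4d2aa34158a": ["3423118775", "3839761587"],
--     "31e70d82-c716-812f-a2f2-f8adb7dc8cc9": ["2743218818"],
--     "31e70d82-c716-8131-8e40-c550d6c358af": ["3658503541", "1874826835"],
--     "31e70d82-c716-8148-95fb-f8e38f1d9292": ["1925879836"],
--     "31e70d82-c716-815e-9cce-c216a363a9df": ["8630023"],
--     "31e70d82-c716-8172-8088-c4cc856f8422": ["907347520"],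
--     "31e70d82-c716-8180-9fa9-e6328d4db9c0": ["1920143820"],
--     "31e70d82-c716-81a8-b2c2-ca848376185e": ["2176700635"],
--     "31e70d82-c716-81ef-9ecb-ec45fbaabaf2": ["2092494182"],
--     "31f70d82-c716-8118-9c2f-de89c74c875b": ["2662751570"],
--     "31f70d82-c716-81ea-9fe9-cff8aee2d0c2": ["1292465559"],
--     "32170d82-c716-81f3-9a23-e5ab265f8f08": ["2300790043"]
-- }
--
-- def get_key_by_qq(qq_str):
--     """
--     根据QQ字符串反向查询字典的键
--     :param qq_str: 要查询的QQ号（字符串格式）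
--     :return: 匹配到的键，未找到返回 None
--     """
--     for key, value in qq_map.items():
--         # 判断值是列表 还是 单个字符串
--         if isinstance(value, list):
--             # 列表：遍历匹配
--             if qq_str in value:
--                 return key
--         else:
--             # 单个字符串：直接匹配
--             if qq_str == value:
--                 return key
--     # 遍历完没找到
--     return None
-- ===== SOURCE B (Python) =====
-- qq_map = {
--     "31e70d82-c716-8032-9ccb-c4d2aa34158a": ["3423118775", "3839761587"],
--     "31e70d82-c716-812f-a2f2-f8adb7dc8cc9": ["2743218818"],
--     "31e70d82-c716-8131-8e40-c550d6c358af": ["3658503541", "1874826835"],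
--     "31e70d82-c716-8148-95fb-f8e38f1d9292": ["1925879836"],
--     "31e70d82-c716-815e-9cce-c216a363a9df": ["8630023"],
--     "31e70d82-c716-8172-8088-c4cc856f8422": ["907347520"],
--     "31e70d82-c716-8180-9fa9-e6328d4db9c0": ["1920143820"],
--     "31e70d82-c716-81a8-b2c2-ca848376185e": ["2176700635"],
--     "31e70d82-c716-81ef-9ecb-ec45fbaabaf2": ["2092494182"],
--     "31f70d82-c716-8118-9c2f-de89c74c875b": ["2662751570"],
--     "31f70d82-c716-81ea-9fe9-cff8aee2d0c2": ["1292465559"],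
--     "32170d82-c716-81f3-9a23-e5ab265f8f08": ["2300790043"]
-- }
--
-- # Flat reverse table (qq, key), sorted by qq once at module load; queries binary-search it.
-- _pairs = sorted(
--     ((qq, key) for key, value in qq_map.items()
--      for qq in (value if isinstance(value, list) else [value])),
--     key=lambda p: p[0],
-- )
--
-- def get_key_by_qq(qq_str):
--     """
--     根据QQ字符串反向查询字典的键
--     :param qq_str: 要查询的QQ号（字符串格式）
--     :return: 匹配到的键，未找到返回 None
--     """
--     lo, hi = 0, len(_pairs)
--     while lo < hi:
--         mid = (lo + hi) // 2
--         if _pairs[mid][0] < qq_str: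
--             lo = mid + 1
--         else:
--             hi = mid
--     if lo < len(_pairs):
--         if _pairs[lo][0] == qq_str:
--             return _pairs[lo][1]
--     return None
-- ===== Notes on version B (the rewrite author's own statement) =====
-- stated objective: alternative
-- what changed: A scans the dict key by key with a per-key list membership test; B flattens qq_map once at module load into a (qq, key) table sorted by qq and answers each query by binary search over that table.
import Mathlib
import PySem

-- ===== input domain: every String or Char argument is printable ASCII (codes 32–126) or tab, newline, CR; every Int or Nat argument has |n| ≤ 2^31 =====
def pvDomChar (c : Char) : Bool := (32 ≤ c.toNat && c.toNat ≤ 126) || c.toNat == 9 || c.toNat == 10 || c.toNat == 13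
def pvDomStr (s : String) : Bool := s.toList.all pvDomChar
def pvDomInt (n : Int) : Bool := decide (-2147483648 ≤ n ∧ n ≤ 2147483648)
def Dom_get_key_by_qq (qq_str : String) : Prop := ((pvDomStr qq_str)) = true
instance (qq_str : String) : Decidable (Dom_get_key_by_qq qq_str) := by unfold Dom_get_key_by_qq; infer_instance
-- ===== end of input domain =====

-- B replaces A's per-call linear scan of qq_map by a binary search over a flat (qq, key)
-- table sorted once at module load; objective: alternative.

-- the module-level qq_map shared by both programs (all values are lists)
def qqMap : List (String × List String) :=
  [("31e70d82-c716-8032-9ccb-c4d2aa34158a", ["3423118775", "3839761587"]),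
   ("31e70d82-c716-812f-a2f2-f8adb7dc8cc9", ["2743218818"]),
   ("31e70d82-c716-8131-8e40-c550d6c358af", ["3658503541", "1874826835"]),
   ("31e70d82-c716-8148-95fb-f8e38f1d9292", ["1925879836"]),
   ("31e70d82-c716-815e-9cce-c216a363a9df", ["8630023"]),
   ("31e70d82-c716-8172-8088-c4cc856f8422", ["907347520"]),
   ("31e70d82-c716-8180-9fa9-e6328d4db9c0", ["1920143820"]),
   ("31e70d82-c716-81a8-b2c2-ca848376185e", ["2176700635"]),
   ("31e70d82-c716-81ef-9ecb-ec45fbaabaf2", ["2092494182"]),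
   ("31f70d82-c716-8118-9c2f-de89c74c875b", ["2662751570"]),
   ("31f70d82-c716-81ea-9fe9-cff8aee2d0c2", ["1292465559"]),
   ("32170d82-c716-81f3-9a23-e5ab265f8f08", ["2300790043"])]

-- ===== PORT A =====
-- A's loop: first key whose value list contains qq_str (early return), else None
def scanA (qq_str : String) : List (String × List String) → Option String
  | [] => none
  | (key, value) :: rest =>
      if value.contains qq_str then some key else scanA qq_str rest

def get_key_by_qq (qq_str : String) : Option String :=
  scanA qq_str qqMap

-- ===== PORT B =====
-- Source B's module-level _pairs: flatten qq_map to (qq, key) pairs, sort by the qq string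
-- Python's str '<' is code-point lexicographic = '<' on .toList (exact per PySem)
def pairsB : List (String × String) :=
  PySem.List.sorted (qqMap.flatMap (fun kv => kv.2.map (fun qq => (qq, kv.1))))
    (fun p => p.1.toList) false

-- the while-loop of Source B (lo/hi always in 0..len, so Nat arithmetic and getD are exact;
-- fuel only makes the loop structurally recursive and is never exhausted)
def bsLoop (qq_str : String) (pairs : List (String × String)) : Nat → Nat → Nat → Nat
  | 0, lo, _ => lo
  | fuel + 1, lo, hi =>
      if lo < hi then
        if (pairs.getD ((lo + hi) / 2) ("", "")).1.toList < qq_str.toList then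
          bsLoop qq_str pairs fuel ((lo + hi) / 2 + 1) hi
        else
          bsLoop qq_str pairs fuel lo ((lo + hi) / 2)
      else lo

def get_key_by_qq_alt (qq_str : String) : Option String :=
  let i := bsLoop qq_str pairsB (pairsB.length + 1) 0 pairsB.length
  if i < pairsB.length then
    if (pairsB.getD i ("", "")).1 == qq_str then some (pairsB.getD i ("", "")).2
    else none
  else none

-- ===== PRECONDITION & SPEC =====
def Spec_get_key_by_qq (qq_str : String) (out : Option String) : Prop := out = get_key_by_qq_alt qq_str
instance (qq_str : String) (out : Option String) : Decidable (Spec_get_key_by_qq qq_str out) := by unfold Spec_get_key_by_qq; infer_instance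

-- ===== CLAIM (what is proved, stated in full; the proofs are below) =====
def Claim_equal_get_key_by_qq : Prop := ∀ (qq_str : String), Dom_get_key_by_qq qq_str → Spec_get_key_by_qq qq_str (get_key_by_qq qq_str)

-- ===== LEMMAS AND PROOFS =====

-- the sorted reverse table, as a literal (named so the miss-case proof can case on indices)
def pairsLit : List (String × String) :=
  [("1292465559", "31f70d82-c716-81ea-9fe9-cff8aee2d0c2"),
   ("1874826835", "31e70d82-c716-8131-8e40-c550d6c358af"),
   ("1920143820", "31e70d82-c716-8180-9fa9-e6328d4db9c0"),
   ("1925879836", "31e70d82-c716-8148-95fb-f8e38f1d9292"),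
   ("2092494182", "31e70d82-c716-81ef-9ecb-ec45fbaabaf2"),
   ("2176700635", "31e70d82-c716-81a8-b2c2-ca848376185e"),
   ("2300790043", "32170d82-c716-81f3-9a23-e5ab265f8f08"),
   ("2662751570", "31f70d82-c716-8118-9c2f-de89c74c875b"),
   ("2743218818", "31e70d82-c716-812f-a2f2-f8adb7dc8cc9"),
   ("3423118775", "31e70d82-c716-8032-9ccb-c4d2aa34158a"),
   ("3658503541", "31e70d82-c716-8131-8e40-c550d6c358af"),
   ("3839761587", "31e70d82-c716-8032-9ccb-c4d2aa34158a"),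
   ("8630023", "31e70d82-c716-815e-9cce-c216a363a9df"),
   ("907347520", "31e70d82-c716-8172-8088-c4cc856f8422")]

theorem pairsB_eq : pairsB = pairsLit := by decide

-- ===== VERDICT (by name: the statement is the Claim_ definition above) =====
theorem get_key_by_qq_spec : Claim_equal_get_key_by_qq := by
  intro s _
  unfold Spec_get_key_by_qq
  by_cases h1 : s = "3423118775"; · subst h1; decide
  by_cases h2 : s = "3839761587"; · subst h2; decide
  by_cases h3 : s = "2743218818"; · subst h3; decide
  by_cases h4 : s = "3658503541"; · subst h4; decide
  by_cases h5 : s = "1874826835"; · subst h5; decide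
  by_cases h6 : s = "1925879836"; · subst h6; decide
  by_cases h7 : s = "8630023"; · subst h7; decide
  by_cases h8 : s = "907347520"; · subst h8; decide
  by_cases h9 : s = "1920143820"; · subst h9; decide
  by_cases h10 : s = "2176700635"; · subst h10; decide
  by_cases h11 : s = "2092494182"; · subst h11; decide
  by_cases h12 : s = "2662751570"; · subst h12; decide
  by_cases h13 : s = "1292465559"; · subst h13; decide
  by_cases h14 : s = "2300790043"; · subst h14; decide
  -- s matches no qq: A's scan returns none, and B's final equality test fails at any index
  have hmiss : ∀ i : Nat, ∀ _ : i < pairsLit.length, (pairsLit.getD i ("", "")).1 ≠ s := by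
    intro i hi
    have : i < 14 := by simpa [pairsLit] using hi
    interval_cases i <;>
      simp [pairsLit] <;>
      first
        | exact fun h => h1 h.symm | exact fun h => h2 h.symm | exact fun h => h3 h.symm
        | exact fun h => h4 h.symm | exact fun h => h5 h.symm | exact fun h => h6 h.symm
        | exact fun h => h7 h.symm | exact fun h => h8 h.symm | exact fun h => h9 h.symm
        | exact fun h => h10 h.symm | exact fun h => h11 h.symm | exact fun h => h12 h.symm
        | exact fun h => h13 h.symm | exact fun h => h14 h.symm
  have hb : get_key_by_qq_alt s = none := by
    unfold get_key_by_qq_alt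
    rw [pairsB_eq]
    by_cases hlt : bsLoop s pairsLit (pairsLit.length + 1) 0 pairsLit.length < pairsLit.length
    · have h := hmiss _ hlt
      simp only [List.getD_eq_getElem _ _ hlt] at h
      simp [hlt, h]
    · simp [hlt]
  rw [hb]
  unfold get_key_by_qq
  simp only [qqMap, scanA, List.contains_iff_mem, List.mem_cons, List.not_mem_nil]
  simp [h1, h2, h3, h4, h5, h6, h7, h8, h9, h10, h11, h12, h13, h14]
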